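-- pv_equiv track=rewrite | github.com/xuanzhao/algorithm-design-analysis-Coursera_stanford- | Lecture 8/max_space_cluster_big.py | flip_two_bit
-- ===== SOURCE A (Python) =====
-- def flip_two_bit(node):
--     """
--     At most we could flip two bit. we could get all potential node.
--     """
--     bits_list = list(node)
--     out = set()
--     bits_length = len(bits_list)
--
--     for i in range(bits_length):
--         for j in range(i,bits_length):
--             new_node = bits_list[:]
--             if i != j:
--                 new_node[i] = ('1' if node[i] == '0' else '0')
--                 new_node[j] = ('1' if node[j] == '0' else '0')
--             else:
--                 new_node[i] = ('1' if node[i] == '0' else '0')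
--             out.add(''.join(new_node))
--
--     return out
-- ===== SOURCE B (Python) =====
-- def flip_two_bit(node):
--     def flip(c):
--         return '1' if c == '0' else '0'
--
--     def one(s):
--         # strings obtained by flipping exactly one position, leftmost first
--         if not s:
--             return []
--         return [flip(s[0]) + s[1:]] + [s[0] + t for t in one(s[1:])]
--
--     def upto2(s):
--         # strings obtained by flipping one or two positions, by leftmost flipped position
--         if not s:
--             return []
--         head, rest = s[0], s[1:]
--         return ([flip(head) + rest]
--                 + [flip(head) + t for t in one(rest)]
--                 + [head + t for t in upto2(rest)])
--
--     return set(upto2(node))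
-- ===== Notes on version B (the rewrite author's own statement) =====
-- stated objective: alternative
-- what changed: Replaces the nested index loops over position pairs by structural recursion on the string: a helper generates all exactly-one-flip strings, and a second recursion produces every 1-or-2-flip string by flipping or keeping the head and recursing on the tail.
import Mathlib
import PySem

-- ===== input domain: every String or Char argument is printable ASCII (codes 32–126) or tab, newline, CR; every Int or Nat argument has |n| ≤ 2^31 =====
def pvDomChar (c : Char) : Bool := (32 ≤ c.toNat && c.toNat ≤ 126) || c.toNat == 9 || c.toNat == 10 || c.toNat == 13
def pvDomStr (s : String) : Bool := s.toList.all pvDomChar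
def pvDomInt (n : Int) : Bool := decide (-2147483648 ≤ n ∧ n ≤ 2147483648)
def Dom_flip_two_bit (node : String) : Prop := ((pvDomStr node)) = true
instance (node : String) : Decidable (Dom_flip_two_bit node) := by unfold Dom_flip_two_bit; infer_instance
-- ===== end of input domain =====

-- B replaces A's nested index loops by structural recursion on the string:
-- single-flip strings are generated by a recursion `one`, and the 1-or-2-flip set by a
-- recursion `upto2` that flips (or keeps) the head and recurses on the tail. Objective: alternative.

-- ===== PORT A =====
-- node[i] is ported as pyGetD over node.toList (exact here: every index comes from
-- range(len) and is in range); ''.join(list of chars) is ported as String.mk.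
def flip_two_bit (node : String) : List String :=
  let bits_list := node.toList
  let bits_length : Int := bits_list.length
  (PySem.List.pyRange 0 bits_length 1).foldl (fun out i =>
    (PySem.List.pyRange i bits_length 1).foldl (fun out j =>
      let new_node := bits_list
      let new_node :=
        if i ≠ j then
          PySem.List.pySetD (PySem.List.pySetD new_node i
              (if PySem.List.pyGetD node.toList i ' ' = '0' then '1' else '0')) j
            (if PySem.List.pyGetD node.toList j ' ' = '0' then '1' else '0')
        else
          PySem.List.pySetD new_node i
            (if PySem.List.pyGetD node.toList i ' ' = '0' then '1' else '0')
      PySem.Set.add out (String.mk new_node)) out) PySem.Set.empty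

-- ===== PORT B =====
-- Source B works on Python strings by slicing/concatenation; the port works on List Char
-- (cons = one-char concat, exact) and rebuilds Strings with String.mk at the end.
def pvFlip (c : Char) : Char := if c = '0' then '1' else '0'

def pvOne : List Char → List (List Char)
  | [] => []
  | c :: rest => (pvFlip c :: rest) :: (pvOne rest).map (fun t => c :: t)

def pvUpto2 : List Char → List (List Char)
  | [] => []
  | c :: rest =>
      (pvFlip c :: rest) ::
        ((pvOne rest).map (fun t => pvFlip c :: t) ++ (pvUpto2 rest).map (fun t => c :: t))

def flip_two_bit_alt (node : String) : List String :=
  PySem.Set.ofList ((pvUpto2 node.toList).map String.mk)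

-- ===== PRECONDITION & SPEC =====
def Spec_flip_two_bit (node : String) (out : List String) : Prop := out = flip_two_bit_alt node
instance (node : String) (out : List String) : Decidable (Spec_flip_two_bit node out) := by unfold Spec_flip_two_bit; infer_instance

-- ===== CLAIM (what is proved, stated in full; the proofs are below) =====
def Claim_equal_flip_two_bit : Prop := ∀ (node : String), Dom_flip_two_bit node → Spec_flip_two_bit node (flip_two_bit node)

-- ===== LEMMAS AND PROOFS =====

-- flip position i of l (reading the char from l), as A does
def pvSetf (l : List Char) (i : Nat) : List Char :=
  l.set i (pvFlip (l.getD i ' '))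

-- A's string for the pair (i, j), i ≤ j
def pvAStr (l : List Char) (i j : Nat) : List Char :=
  if i = j then pvSetf l i else pvSetf (pvSetf l i) j

-- A's full enumeration, in A's order
def pvAList (l : List Char) : List (List Char) :=
  (List.range l.length).flatMap (fun i =>
    (List.range (l.length - i)).map (fun k => pvAStr l i (i + k)))

theorem pvSetf_cons (c : Char) (rest : List Char) (i : Nat) :
    pvSetf (c :: rest) (i + 1) = c :: pvSetf rest i := by
  simp [pvSetf, List.getD]

theorem pvAStr_cons (c : Char) (rest : List Char) (i j : Nat) :
    pvAStr (c :: rest) (i + 1) (j + 1) = c :: pvAStr rest i j := by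
  by_cases h : i = j <;>
    simp [pvAStr, h, pvSetf_cons]

theorem pvOne_eq (l : List Char) :
    (List.range l.length).map (fun j => pvSetf l j) = pvOne l := by
  induction l with
  | nil => simp [pvOne]
  | cons c rest ih =>
      simp only [List.length_cons, List.range_succ_eq_map, List.map_cons, List.map_map]
      rw [pvOne, ← ih]
      refine congrArg₂ _ ?_ ?_
      · simp [pvSetf, List.getD]
      · rw [List.map_map]
        refine List.map_congr_left fun j _ => ?_
        simp [Function.comp, pvSetf_cons]

theorem pvAList_eq (l : List Char) : pvAList l = pvUpto2 l := by
  induction l with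
  | nil => rfl
  | cons c rest ih =>
      rw [pvUpto2, ← ih]
      unfold pvAList
      rw [List.length_cons, List.range_succ_eq_map, List.flatMap_cons, List.flatMap_map]
      have hset0 : pvSetf (c :: rest) 0 = pvFlip c :: rest := by
        simp [pvSetf, List.getD]
      have h0 : (List.range (rest.length + 1 - 0)).map (fun k => pvAStr (c :: rest) 0 (0 + k))
          = (pvFlip c :: rest) :: (pvOne rest).map (fun t => pvFlip c :: t) := by
        rw [Nat.sub_zero, List.range_succ_eq_map, List.map_cons, List.map_map, ← pvOne_eq,
          List.map_map]
        refine congrArg₂ _ ?_ (List.map_congr_left fun k _ => ?_)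
        · simp [pvAStr, hset0]
        · show pvAStr (c :: rest) (0 + 0) (0 + Nat.succ k) = pvFlip c :: pvSetf rest k
          have h1 : (0 + Nat.succ k) = k + 1 := by omega
          have h2 : (0 + 0) = 0 := rfl
          rw [h1, h2]
          have : (0 : Nat) ≠ k + 1 := by omega
          simp only [pvAStr, if_neg this, hset0, pvSetf_cons]
      have h2 : ∀ i ∈ List.range rest.length,
          (List.range (rest.length + 1 - Nat.succ i)).map
              (fun k => pvAStr (c :: rest) (Nat.succ i) (Nat.succ i + k))
            = ((List.range (rest.length - i)).map (fun k => pvAStr rest i (i + k))).map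
                (fun t => c :: t) := by
        intro i _
        rw [List.map_map, Nat.succ_sub_succ]
        refine List.map_congr_left fun k _ => ?_
        show pvAStr (c :: rest) (i + 1) (Nat.succ i + k) = c :: pvAStr rest i (i + k)
        have : Nat.succ i + k = (i + k) + 1 := by omega
        rw [this, pvAStr_cons]
      rw [h0, List.flatMap_congr h2, List.cons_append]
      refine congrArg _ (congrArg _ ?_)
      rw [List.map_flatMap]

theorem foldl_update_eq_update_flatten (rs : List (List String)) (s : PySem.Set String) :
    rs.foldl PySem.Set.update s = PySem.Set.update s rs.flatten := by
  induction rs generalizing s with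
  | nil => simp [PySem.Set.update]
  | cons r rs ih => simp [List.foldl_cons, ih, PySem.Set.update_append]

theorem nested_add_eq (n : Int) (g : Int → Int → String) :
    (PySem.List.pyRange 0 n 1).foldl (fun out i =>
        (PySem.List.pyRange i n 1).foldl (fun out j => PySem.Set.add out (g i j)) out)
      PySem.Set.empty
    = PySem.Set.ofList ((PySem.List.pyRange 0 n 1).flatMap
        (fun i => (PySem.List.pyRange i n 1).map (g i))) := by
  have h1 : ∀ (out : PySem.Set String) (i : Int),
      (PySem.List.pyRange i n 1).foldl (fun out j => PySem.Set.add out (g i j)) out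
        = PySem.Set.update out ((PySem.List.pyRange i n 1).map (g i)) := by
    intro out i
    rw [PySem.Set.update_map_eq_foldl_add]
  calc (PySem.List.pyRange 0 n 1).foldl (fun out i =>
          (PySem.List.pyRange i n 1).foldl (fun out j => PySem.Set.add out (g i j)) out)
        PySem.Set.empty
      = (PySem.List.pyRange 0 n 1).foldl (fun out i =>
          PySem.Set.update out ((PySem.List.pyRange i n 1).map (g i))) PySem.Set.empty := by
        simp only [h1]
    _ = ((PySem.List.pyRange 0 n 1).map
          (fun i => (PySem.List.pyRange i n 1).map (g i))).foldl PySem.Set.update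
            PySem.Set.empty := by
        rw [List.foldl_map]
    _ = PySem.Set.update PySem.Set.empty ((PySem.List.pyRange 0 n 1).map
          (fun i => (PySem.List.pyRange i n 1).map (g i))).flatten := by
        rw [foldl_update_eq_update_flatten]
    _ = _ := by
        rw [PySem.Set.update_empty, List.flatMap_def]

theorem getD_set_ne (l : List Char) (i j : Nat) (v d : Char) (h : i ≠ j) :
    (l.set i v).getD j d = l.getD j d := by
  simp [List.getD_eq_getElem?_getD, List.getElem?_set_ne h]

theorem flip_two_bit_eq (node : String) :
    flip_two_bit node = PySem.Set.ofList ((pvAList node.toList).map String.mk) := by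
  simp only [flip_two_bit]
  refine Eq.trans (nested_add_eq _ _) ?_
  refine congrArg PySem.Set.ofList ?_
  unfold pvAList
  rw [List.map_flatMap, PySem.List.pyRange_one 0 _, List.flatMap_map]
  have hN : (((node.toList.length : Int)) - 0).toNat = node.toList.length := by omega
  rw [hN]
  refine List.flatMap_congr fun i hi => ?_
  rw [List.mem_range] at hi
  rw [zero_add, PySem.List.pyRange_one, List.map_map, List.map_map]
  have hLi : (((node.toList.length : Int)) - (i : Int)).toNat = node.toList.length - i := by
    omega
  rw [hLi]
  refine List.map_congr_left fun k hk => ?_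
  rw [List.mem_range] at hk
  have hcast : (i : Int) + (k : Int) = ((i + k : Nat) : Int) := by push_cast; ring
  by_cases h : i = i + k
  · have hk0 : k = 0 := by omega
    subst hk0
    simp [pvAStr, pvSetf, pvFlip, Function.comp]
  · simp only [Function.comp_apply, hcast, Nat.cast_inj, ne_eq]
    simp only [if_pos h, pvAStr, if_neg h, pvSetf,
      PySem.List.pySetD_natCast, PySem.List.pyGetD_natCast,
      getD_set_ne _ _ _ _ _ h, pvFlip]

-- ===== VERDICT (by name: the statement is the Claim_ definition above) =====
theorem flip_two_bit_spec : Claim_equal_flip_two_bit := by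
  intro node _
  unfold Spec_flip_two_bit flip_two_bit_alt
  rw [flip_two_bit_eq, pvAList_eq]
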